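-- pv_equiv track=rewrite | github.com/pypi-data/pypi-mirror-301 | packages/waterbridge/waterbridge-0.2.0-py3-none-any.whl/waterbridge/3_Nomenclature of waterbridges.py | group_list_prefix
-- ===== SOURCE A (Python) =====
-- def group_list_prefix(old_list):
--     grouped = {}
--     for item in old_list:
--         prefix = item[:9]
--         if prefix not in grouped:
--             grouped[prefix] = []
--         grouped[prefix].append(item)
--     new_list = list(grouped.values())
--     return new_list
-- ===== SOURCE B (Python) =====
-- def group_list_prefix(old_list):
--     seen = set()
--     prefixes = []
--     for item in old_list:
--         p = item[:9]
--         if p not in seen: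
--             seen.add(p)
--             prefixes.append(p)
--     return [[item for item in old_list if item[:9] == p] for p in prefixes]
-- ===== Notes on version B (the rewrite author's own statement) =====
-- stated objective: alternative
-- what changed: Replaces the single indexed-dict grouping pass with two phases: one scan collecting the distinct 9-char prefixes in first-occurrence order via a 'seen' set, then one filtering comprehension over the whole list per distinct prefix.
import Mathlib
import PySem

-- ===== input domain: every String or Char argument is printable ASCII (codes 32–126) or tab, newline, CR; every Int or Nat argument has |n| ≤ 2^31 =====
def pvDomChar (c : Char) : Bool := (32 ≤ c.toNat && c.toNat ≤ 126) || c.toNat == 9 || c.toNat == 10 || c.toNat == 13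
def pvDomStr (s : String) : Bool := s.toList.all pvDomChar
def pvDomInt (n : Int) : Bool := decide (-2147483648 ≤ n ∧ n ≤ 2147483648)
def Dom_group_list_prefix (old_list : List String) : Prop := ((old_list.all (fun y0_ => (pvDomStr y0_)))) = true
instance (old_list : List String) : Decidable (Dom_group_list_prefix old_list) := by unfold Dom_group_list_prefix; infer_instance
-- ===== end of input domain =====

-- B groups by the same 9-char prefixes but in two phases (a distinct-prefix scan with a seen set, then one filtering pass per prefix) instead of A's single indexed-dict pass; the return values are proved equal.

-- item[:9], the grouping key both programs compute
def pvPrefix (s : String) : String := PySem.Str.slice s none (some 9)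

-- ===== PORT A =====
def group_list_prefix (old_list : List String) : List (List String) :=
  let grouped := old_list.foldl (fun grouped item =>
    let pfx := pvPrefix item
    let grouped := if grouped.contains pfx then grouped else grouped.insert pfx []
    grouped.insert pfx (grouped.getD pfx [] ++ [item])) PySem.Dict.empty
  grouped.values

-- ===== PORT B =====
def group_list_prefix_alt (old_list : List String) : List (List String) :=
  let st := old_list.foldl (fun (st : PySem.Set String × List String) item =>
    let p := pvPrefix item
    if PySem.Set.contains st.1 p then st else (PySem.Set.add st.1 p, st.2 ++ [p]))
    (PySem.Set.empty, [])
  st.2.map (fun p => old_list.filter (fun item => pvPrefix item == p))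

-- ===== PRECONDITION & SPEC =====
def Spec_group_list_prefix (old_list : List String) (out : List (List String)) : Prop := out = group_list_prefix_alt old_list
instance (old_list : List String) (out : List (List String)) : Decidable (Spec_group_list_prefix old_list out) := by unfold Spec_group_list_prefix; infer_instance

-- ===== CLAIM (what is proved, stated in full; the proofs are below) =====
def Claim_equal_group_list_prefix : Prop := ∀ (old_list : List String), Dom_group_list_prefix old_list → Spec_group_list_prefix old_list (group_list_prefix old_list)

-- ===== LEMMAS AND PROOFS =====

-- A's loop body ('ensure key, then append') is Dict.modify with default []
lemma stepA_eq_modify (d : PySem.Dict String (List String)) (item : String) :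
    (let d' := if d.contains (pvPrefix item) then d else d.insert (pvPrefix item) [];
     d'.insert (pvPrefix item) (d'.getD (pvPrefix item) [] ++ [item]))
    = d.modify (pvPrefix item) [] (· ++ [item]) := by
  by_cases h : d.contains (pvPrefix item) = true
  · simp [h, PySem.Dict.modify]
  · have h' : d.contains (pvPrefix item) = false := by simpa using h
    simp only [h', Bool.false_eq_true, ite_false]
    rw [PySem.Dict.getD_insert_self]
    apply PySem.Dict.ext
    rw [PySem.Dict.items_insert_of_contains _ _ (PySem.Dict.contains_insert_self _ _ _)]
    rw [PySem.Dict.items_insert_of_not_contains _ _ h']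
    rw [PySem.Dict.modify, PySem.Dict.items_insert_of_not_contains _ _ h']
    rw [PySem.Dict.getD_of_not_contains _ _ h']
    have : ∀ q ∈ d.items, q.1 ≠ pvPrefix item := by
      intro q hq hc
      have : d.contains q.1 = true := by
        rw [PySem.Dict.contains_iff_mem_keys]
        exact PySem.Dict.mem_keys_of_mem_items _ hq
      rw [hc] at this; rw [h'] at this; exact Bool.noConfusion this
    rw [List.map_append]
    congr 1
    rw [List.map_congr_left (g := id), List.map_id]
    intro q hq
    simp [this q hq]
    simp

-- with unique keys, dict.values() is the per-key lookup over dict's keys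
lemma values_eq_map_getD (d : PySem.Dict String (List String)) (h : d.keys.Nodup) :
    d.values = d.keys.map (fun k => d.getD k []) := by
  show d.items.map (·.2) = (d.items.map (·.1)).map (fun k => d.getD k [])
  rw [List.map_map]
  apply List.map_congr_left
  intro q hq
  have : d.getD q.1 [] = q.2 := PySem.Dict.getD_of_mem_items d (by simpa using hq) h []
  simp [this]

-- B's seen/prefixes loop: both components stay equal and accumulate Set.update
lemma foldB_eq_update (l : List String) (ps : List String) :
    l.foldl (fun (st : PySem.Set String × List String) item =>
        if PySem.Set.contains st.1 (pvPrefix item) then st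
        else (PySem.Set.add st.1 (pvPrefix item), st.2 ++ [pvPrefix item])) (ps, ps)
    = (PySem.Set.update ps (l.map pvPrefix), PySem.Set.update ps (l.map pvPrefix)) := by
  induction l generalizing ps with
  | nil => simp [PySem.Set.update]
  | cons x t ih =>
    simp only [List.foldl_cons, List.map_cons, PySem.Set.update_cons]
    by_cases h : pvPrefix x ∈ ps
    · have hc : PySem.Set.contains ps (pvPrefix x) = true := by
        simp [PySem.Set.contains, h]
      rw [if_pos hc, PySem.Set.add_of_mem h]
      exact ih ps
    · rw [if_neg (by simpa using h)]
      rw [PySem.Set.add_of_not_mem h]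
      exact ih (ps ++ [pvPrefix x])

-- A's dict pass produces exactly: for each distinct prefix in first-occurrence order, the filter of the input by that prefix
lemma groupA_eq (old_list : List String) :
    (old_list.foldl (fun grouped item =>
        let d' := if grouped.contains (pvPrefix item) then grouped else grouped.insert (pvPrefix item) [];
        d'.insert (pvPrefix item) (d'.getD (pvPrefix item) [] ++ [item])) PySem.Dict.empty).values
    = (PySem.Set.ofList (old_list.map pvPrefix)).map
        (fun p => old_list.filter (fun item => pvPrefix item == p)) := by
  have hcong := PySem.List.foldl_congr_mem (l := old_list) (init := (PySem.Dict.empty : PySem.Dict String (List String)))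
      (f := fun grouped item =>
        let d' := if grouped.contains (pvPrefix item) then grouped else grouped.insert (pvPrefix item) [];
        d'.insert (pvPrefix item) (d'.getD (pvPrefix item) [] ++ [item]))
      (g := fun d item => PySem.Dict.modify d (pvPrefix item) [] (· ++ [item]))
      (by intro acc x _; exact stepA_eq_modify acc x)
  rw [hcong]
  set D := old_list.foldl (fun d item => PySem.Dict.modify d (pvPrefix item) [] (· ++ [item])) PySem.Dict.empty with hD
  have hkeys : D.keys = PySem.Set.ofList (old_list.map pvPrefix) := by
    rw [hD, PySem.Dict.keys_foldl_modify_key old_list pvPrefix [] (fun _ item v => v ++ [item])]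
    simp [PySem.Dict.keys_empty, PySem.Set.ofList]
    rfl
  have hnd : D.keys.Nodup := by
    rw [hkeys]; exact PySem.Set.nodup_ofList _
  have hget : ∀ c, D.getD c [] = old_list.filter (fun item => pvPrefix item == c) := by
    intro c
    have hm : old_list.foldl (fun d item => PySem.Dict.modify d (pvPrefix item) [] (· ++ [item])) PySem.Dict.empty
        = (old_list.map (fun it => (pvPrefix it, it))).foldl (fun d p => PySem.Dict.modify d p.1 [] (· ++ [p.2])) PySem.Dict.empty := by
      rw [List.foldl_map]
    rw [hD, hm, PySem.Dict.getD_foldl_modify_append]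
    rw [List.filter_map]
    simp [List.map_map, Function.comp_def]
  rw [values_eq_map_getD D hnd, hkeys]
  apply List.map_congr_left
  intro p _
  exact hget p

-- ===== VERDICT (by name: the statement is the Claim_ definition above) =====
theorem group_list_prefix_spec : Claim_equal_group_list_prefix := by
  intro old_list _
  show group_list_prefix old_list = group_list_prefix_alt old_list
  unfold group_list_prefix group_list_prefix_alt
  rw [groupA_eq]
  have hB := foldB_eq_update old_list []
  show _ = ((old_list.foldl (fun (st : PySem.Set String × List String) item =>
      if PySem.Set.contains st.1 (pvPrefix item) then st
      else (PySem.Set.add st.1 (pvPrefix item), st.2 ++ [pvPrefix item])) ([], [])).2).map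
      (fun p => old_list.filter (fun item => pvPrefix item == p))
  rw [hB]
  rfl
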